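-- pv_equiv track=rewrite | github.com/nno0obb/algorithm-ps | boj/1292/soln1292.py | easy_sum
-- ===== SOURCE A (Python) =====
-- def easy_sum(n: int) -> int:
--     s, cnt = 0, 0
--     for i in range(1, 1000 + 1):
--         if cnt + i < n:
--             s += i * i
--             cnt += i
--         else:
--             s += i * (n - cnt)
--             break
--     return s
-- ===== SOURCE B (Python) =====
-- def easy_sum(n: int) -> int:
--     # Closed forms instead of per-term accumulation.
--     def tri(k):  # 1 + 2 + ... + k
--         return k * (k + 1) // 2
--
--     def sqsum(k):  # 1^2 + 2^2 + ... + k^2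
--         return k * (k + 1) * (2 * k + 1) // 6
--
--     if tri(1000) < n:
--         # the 1000-term loop of the task exhausts without reaching n
--         return sqsum(1000)
--     # binary search the smallest k in [1, 1000] with tri(k) >= n
--     lo, hi = 1, 1000
--     while lo < hi:
--         mid = (lo + hi) // 2
--         if tri(mid) < n:
--             lo = mid + 1
--         else:
--             hi = mid
--     return sqsum(lo - 1) + lo * (n - tri(lo - 1))
-- ===== Notes on version B (the rewrite author's own statement) =====
-- stated objective: alternative
-- what changed: Replaces the up-to-1000-iteration accumulation loop with a binary search for the stopping block plus closed-form triangular and square-pyramidal sums.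
import Mathlib
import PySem

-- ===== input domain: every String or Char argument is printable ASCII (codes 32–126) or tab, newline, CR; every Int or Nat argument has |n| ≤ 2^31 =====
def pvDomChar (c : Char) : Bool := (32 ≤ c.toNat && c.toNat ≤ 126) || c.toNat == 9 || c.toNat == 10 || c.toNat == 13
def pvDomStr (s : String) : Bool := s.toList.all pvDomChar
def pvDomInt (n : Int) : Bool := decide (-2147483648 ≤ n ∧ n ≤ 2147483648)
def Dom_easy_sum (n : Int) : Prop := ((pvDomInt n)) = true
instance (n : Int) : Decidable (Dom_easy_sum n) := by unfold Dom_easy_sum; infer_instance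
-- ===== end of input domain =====

-- B replaces A's accumulation loop by a binary search for the stopping block plus closed-form sums.

-- ===== PORT A =====
-- the for-loop with break, as counting recursion over i = 1 .. 1000 with state (s, cnt)
def easyLoopA (n i s cnt : Int) : Int :=
  if _h : i ≤ 1000 then
    if cnt + i < n then easyLoopA n (i + 1) (s + i * i) (cnt + i)
    else s + i * (n - cnt)
  else s
termination_by (1001 - i).toNat
decreasing_by omega

def easy_sum (n : Int) : Int := easyLoopA n 1 0 0

-- ===== PORT B =====
def triB (k : Int) : Int := PySem.Int.floordiv (k * (k + 1)) 2
def sqsumB (k : Int) : Int := PySem.Int.floordiv (k * (k + 1) * (2 * k + 1)) 6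

-- while lo < hi: mid = (lo+hi)//2; tri(mid) < n → lo = mid+1 else hi = mid
def bsearchB (n lo hi : Int) : Int :=
  if _h : lo < hi then
    let mid := PySem.Int.floordiv (lo + hi) 2
    if triB mid < n then bsearchB n (mid + 1) hi
    else bsearchB n lo mid
  else lo
termination_by (hi - lo).toNat
decreasing_by
  all_goals
    have := PySem.Int.floordiv_two_mid_bounds (le_of_lt _h)
    have h2 : PySem.Int.floordiv (lo + hi) 2 < hi := by
      rw [PySem.Int.floordiv_eq_ediv_of_pos (by omega)] at *
      omega
    omega

def easy_sum_alt (n : Int) : Int :=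
  if triB 1000 < n then sqsumB 1000
  else
    let k := bsearchB n 1 1000
    sqsumB (k - 1) + k * (n - triB (k - 1))

-- ===== PRECONDITION & SPEC =====
def Spec_easy_sum (n : Int) (out : Int) : Prop := out = easy_sum_alt n
instance (n : Int) (out : Int) : Decidable (Spec_easy_sum n out) := by unfold Spec_easy_sum; infer_instance

-- ===== CLAIM (what is proved, stated in full; the proofs are below) =====
def Claim_equal_easy_sum : Prop := ∀ (n : Int), Dom_easy_sum n → Spec_easy_sum n (easy_sum n)

-- ===== LEMMAS AND PROOFS =====

-- closed forms as plain Int expressions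
lemma triB_eq (k : Int) : triB k = k * (k + 1) / 2 := by
  rw [triB, PySem.Int.floordiv_eq_ediv_of_pos (by norm_num)]

lemma two_mul_triB (k : Int) : 2 * triB k = k * (k + 1) := by
  rw [triB_eq]
  have h : (2 : Int) ∣ k * (k + 1) := (Int.even_mul_succ_self k).two_dvd
  omega

lemma triB_succ (k : Int) : triB (k + 1) = triB k + (k + 1) := by
  have h1 := two_mul_triB k
  have h2 := two_mul_triB (k + 1)
  nlinarith [h1, h2]

lemma triB_mono {a b : Int} (ha : 0 ≤ a) (hab : a ≤ b) : triB a ≤ triB b := by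
  have h1 := two_mul_triB a
  have h2 := two_mul_triB b
  nlinarith

lemma six_dvd_sq (m : Int) : (6 : Int) ∣ m * (m + 1) * (2 * m + 1) := by
  have h3 : m % 3 = 0 ∨ m % 3 = 1 ∨ m % 3 = 2 := by omega
  have h2 : (2 : Int) ∣ m * (m + 1) := (Int.even_mul_succ_self m).two_dvd
  obtain ⟨c, hc⟩ := h2
  have : (3 : Int) ∣ m * (m + 1) * (2 * m + 1) := by
    rcases h3 with h | h | h
    · exact Dvd.dvd.mul_right (Dvd.dvd.mul_right (by omega) _) _
    · exact Dvd.dvd.mul_left (by omega) _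
    · exact Dvd.dvd.mul_right (Dvd.dvd.mul_left (by omega) _) _
  obtain ⟨d, hd⟩ := this
  -- m*(m+1) = 2c and m*(m+1)*(2m+1) = 3d ⇒ divisible by 6
  have hc' : m * (m + 1) * (2 * m + 1) = 2 * (c * (2 * m + 1)) := by rw [hc]; ring
  omega

lemma six_mul_sqsumB (m : Int) : 6 * sqsumB m = m * (m + 1) * (2 * m + 1) := by
  rw [sqsumB, PySem.Int.floordiv_eq_ediv_of_pos (by norm_num)]
  have := six_dvd_sq m
  omega

lemma sqsumB_succ (k : Int) : sqsumB (k + 1) = sqsumB k + (k + 1) * (k + 1) := by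
  have h1 := six_mul_sqsumB k
  have h2 := six_mul_sqsumB (k + 1)
  nlinarith

-- the stopping block: smallest k in [1,1000] with n ≤ triB k
def IsStop (n k : Int) : Prop :=
  1 ≤ k ∧ k ≤ 1000 ∧ n ≤ triB k ∧ ∀ j, 1 ≤ j → j < k → triB j < n

-- A's loop, run from block j with the accumulated state, lands on the stop formula
lemma loopA_eq (n k : Int) (hk : IsStop n k) :
    ∀ (m : Nat) (j : Int), 1 ≤ j → j ≤ k → (k - j).toNat = m →
      easyLoopA n j (sqsumB (j - 1)) (triB (j - 1)) =
        sqsumB (k - 1) + k * (n - triB (k - 1)) := by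
  obtain ⟨hk1, hk1000, hkn, hkmin⟩ := hk
  intro m
  induction m with
  | zero =>
    intro j hj1 hjk hm
    have hjk' : j = k := by omega
    subst hjk'
    rw [easyLoopA, dif_pos (by omega : j ≤ 1000)]
    have ht : triB (j - 1) + j = triB j := by
      have := triB_succ (j - 1); simpa using this.symm
    rw [if_neg (by omega)]
  | succ m ih =>
    intro j hj1 hjk hm
    have hjlt : j < k := by omega
    rw [easyLoopA, dif_pos (by omega : j ≤ 1000)]
    have ht : triB (j - 1) + j = triB j := by
      have := triB_succ (j - 1); simpa using this.symm
    have hlt : triB j < n := hkmin j hj1 hjlt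
    rw [if_pos (by omega)]
    have hs : sqsumB (j - 1) + j * j = sqsumB j := by
      have := sqsumB_succ (j - 1); simp at this; nlinarith [this]
    have := ih (j + 1) (by omega) (by omega) (by omega)
    simpa [ht, hs] using this

-- full exhaustion when n is beyond the 1000-block total
lemma loopA_full (n : Int) (hn : triB 1000 < n) :
    ∀ (m : Nat) (j : Int), 1 ≤ j → j ≤ 1001 → (1001 - j).toNat = m →
      easyLoopA n j (sqsumB (j - 1)) (triB (j - 1)) = sqsumB 1000 := by
  intro m
  induction m with
  | zero =>
    intro j hj1 hj hm
    have : j = 1001 := by omega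
    subst this
    rw [easyLoopA, dif_neg (by omega)]
    norm_num
  | succ m ih =>
    intro j hj1 hj hm
    have hj' : j ≤ 1000 := by omega
    rw [easyLoopA, dif_pos hj']
    have ht : triB (j - 1) + j = triB j := by
      have := triB_succ (j - 1); simpa using this.symm
    have hmono : triB j ≤ triB 1000 := triB_mono (by omega) (by omega)
    rw [if_pos (by omega)]
    have hs : sqsumB (j - 1) + j * j = sqsumB j := by
      have := sqsumB_succ (j - 1); simp at this; nlinarith [this]
    have := ih (j + 1) (by omega) (by omega) (by omega)
    simpa [ht, hs] using this

-- binary search finds the stopping block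
lemma bsearchB_eq (n k : Int) (hk : IsStop n k) :
    ∀ (m : Nat) (lo hi : Int), 1 ≤ lo → lo ≤ k → k ≤ hi → (hi - lo).toNat = m →
      bsearchB n lo hi = k := by
  obtain ⟨hk1, hk1000, hkn, hkmin⟩ := hk
  intro m
  induction m using Nat.strong_induction_on with
  | _ m ih =>
    intro lo hi hlo1 hlok hkhi hm
    rw [bsearchB]
    by_cases h : lo < hi
    · rw [dif_pos h]
      have hmid := PySem.Int.floordiv_two_mid_bounds (le_of_lt h)
      set mid := PySem.Int.floordiv (lo + hi) 2 with hmiddef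
      have hmid2 : lo ≤ mid ∧ mid < hi := by
        constructor
        · exact hmid.1
        · rw [hmiddef, PySem.Int.floordiv_eq_ediv_of_pos (by omega)]; omega
      by_cases hc : triB mid < n
      · rw [if_pos hc]
        have hkgt : mid < k := by
          by_contra hcon
          have : triB k ≤ triB mid := triB_mono (by omega) (by omega)
          omega
        exact ih (hi - (mid + 1)).toNat (by omega) (mid + 1) hi (by omega) (by omega) hkhi rfl
      · rw [if_neg hc]
        have hkle : k ≤ mid := by
          by_contra hcon
          exact hc (hkmin mid (by omega) (by omega))
        exact ih (mid - lo).toNat (by omega) lo mid hlo1 hlok hkle rfl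
    · rw [dif_neg h]; omega

lemma stop_exists (n : Int) (hn : n ≤ triB 1000) : ∃ k, IsStop n k := by
  by_cases h0 : n ≤ triB 1
  · exact ⟨1, by norm_num, by norm_num, h0, by intro j h1 h2; omega⟩
  · -- smallest k: well-founded descent via Nat.find on p m := n ≤ triB (m+1)
    have hex : ∃ m : Nat, n ≤ triB (m + 1) := ⟨999, by norm_num at hn ⊢; exact hn⟩
    classical
    let M := Nat.find hex
    refine ⟨(M : Int) + 1, by omega, ?_, Nat.find_spec hex, ?_⟩
    · -- M ≤ 999 since triB is monotone and n ≤ triB 1000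
      by_contra hcon
      have h999 : ¬ n ≤ triB ((999 : Nat) + 1) := Nat.find_min hex (by omega)
      norm_num at h999 hn
      omega
    · intro j hj1 hjM
      by_contra hcon
      have hj' : n ≤ triB j := by omega
      have hjn : ∃ a : Nat, (a : Int) = j - 1 := ⟨(j - 1).toNat, by omega⟩
      obtain ⟨a, ha⟩ := hjn
      have : ¬ n ≤ triB ((a : Int) + 1) := Nat.find_min hex (by omega)
      rw [ha] at this
      simp at this
      omega

-- ===== VERDICT (by name: the statement is the Claim_ definition above) =====
theorem easy_sum_spec : Claim_equal_easy_sum := by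
  intro n _
  unfold Spec_easy_sum easy_sum easy_sum_alt
  by_cases h : triB 1000 < n
  · rw [if_pos h]
    have := loopA_full n h 1000 1 (by norm_num) (by norm_num) rfl
    simpa [triB, sqsumB, PySem.Int.floordiv] using this
  · rw [if_neg h]
    obtain ⟨k, hk⟩ := stop_exists n (by omega)
    have hb := bsearchB_eq n k hk 999 1 1000 (by norm_num) hk.1 hk.2.1 rfl
    have hl := loopA_eq n k hk (k - 1).toNat 1 (by norm_num) hk.1 (by omega)
    simp only [hb]
    have h0 : sqsumB 0 = 0 := by simp [sqsumB, PySem.Int.floordiv]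
    have t0 : triB 0 = 0 := by simp [triB, PySem.Int.floordiv]
    simpa [h0, t0] using hl
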